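-- pv_equiv track=rewrite | github.com/hunnieej/PanoGen | MultiDiffusion/projection.py | ring_coords
-- ===== SOURCE A (Python) =====
-- def ring_coords(H: int, i: int):
--     mid = H // 2
--     top, left  = mid - i,     mid - i
--     bot, right = mid + i - 1, mid + i - 1
--     coords = []
--     for c in range(left, right + 1):
--         coords.append((top, c))
--     for r in range(top + 1, bot):
--         coords.append((r, right))
--     for c in range(right, left - 1, -1):
--         coords.append((bot, c))
--     for r in range(bot - 1, top, -1):
--         coords.append((r, left))
--     return coords
-- ===== SOURCE B (Python) =====
-- def ring_coords(H: int, i: int):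
--     if i <= 0:
--         return []
--     mid = H // 2
--     top = left = mid - i
--     bot = right = mid + i - 1
--     r, c, dr, dc = top, left, 0, 1
--     out = []
--     push = out.append
--     for _ in range(8 * i - 4):
--         push((r, c))
--         if not (top <= r + dr <= bot and left <= c + dc <= right):
--             dr, dc = dc, -dr
--         r, c = r + dr, c + dc
--     return out
-- ===== Notes on version B (the rewrite author's own statement) =====
-- stated objective: alternative
-- what changed: Replaced A's four separate edge loops by a single turtle walk of 8*i-4 steps that traverses the ring cell-by-cell, turning clockwise whenever the next step would leave the ring's bounding box.
import Mathlib
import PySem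

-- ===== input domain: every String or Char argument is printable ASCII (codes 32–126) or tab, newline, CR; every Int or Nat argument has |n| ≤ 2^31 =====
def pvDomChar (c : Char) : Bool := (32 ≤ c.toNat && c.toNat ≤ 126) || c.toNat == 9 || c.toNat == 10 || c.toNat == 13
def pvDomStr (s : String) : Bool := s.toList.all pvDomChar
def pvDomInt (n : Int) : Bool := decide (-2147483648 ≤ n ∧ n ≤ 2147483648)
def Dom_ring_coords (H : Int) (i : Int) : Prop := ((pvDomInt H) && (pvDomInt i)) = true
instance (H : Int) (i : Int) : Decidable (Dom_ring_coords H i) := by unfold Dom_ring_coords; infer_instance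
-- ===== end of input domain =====

-- B replaces A's four edge loops by a single clockwise "turtle" walk of 8*i-4 steps (alternative decomposition, same cost).


-- ===== PORT A =====
def ring_coords (H : Int) (i : Int) : List (Int × Int) :=
  let mid := PySem.Int.floordiv H 2
  let top := mid - i
  let left := mid - i
  let bot := mid + i - 1
  let right := mid + i - 1
  let coords : List (Int × Int) := []
  let coords := (PySem.List.pyRange left (right + 1) 1).foldl (fun acc c => acc ++ [(top, c)]) coords
  let coords := (PySem.List.pyRange (top + 1) bot 1).foldl (fun acc r => acc ++ [(r, right)]) coords
  let coords := (PySem.List.pyRange right (left - 1) (-1)).foldl (fun acc c => acc ++ [(bot, c)]) coords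
  let coords := (PySem.List.pyRange (bot - 1) top (-1)).foldl (fun acc r => acc ++ [(r, left)]) coords
  coords

-- ===== PORT B =====
-- one step of B's loop body per unit of fuel: emit the current cell, turn clockwise
-- if the next cell would leave the box, then move
def turtle (fuel : Nat) (top bot left right r c dr dc : Int) : List (Int × Int) :=
  match fuel with
  | 0 => []
  | Nat.succ n =>
    if top ≤ r + dr ∧ r + dr ≤ bot ∧ left ≤ c + dc ∧ c + dc ≤ right then
      (r, c) :: turtle n top bot left right (r + dr) (c + dc) dr dc
    else
      (r, c) :: turtle n top bot left right (r + dc) (c + (-dr)) dc (-dr)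

def ring_coords_alt (H : Int) (i : Int) : List (Int × Int) :=
  if i ≤ 0 then []
  else
    let mid := PySem.Int.floordiv H 2
    let top := mid - i
    let left := mid - i
    let bot := mid + i - 1
    let right := mid + i - 1
    turtle (8 * i - 4).toNat top bot left right top left 0 1

-- ===== PRECONDITION & SPEC =====
def Spec_ring_coords (H : Int) (i : Int) (out : List (Int × Int)) : Prop := out = ring_coords_alt H i
instance (H : Int) (i : Int) (out : List (Int × Int)) : Decidable (Spec_ring_coords H i out) := by unfold Spec_ring_coords; infer_instance

-- ===== CLAIM (what is proved, stated in full; the proofs are below) =====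
def Claim_equal_ring_coords : Prop := ∀ (H : Int) (i : Int), Dom_ring_coords H i → Spec_ring_coords H i (ring_coords H i)

-- ===== LEMMAS AND PROOFS =====

-- four straight-run lemmas: k non-turning steps in each of the four headings
lemma turtle_run_right (k : Nat) : ∀ (n : Nat) (top bot left right r c : Int),
    top ≤ r → r ≤ bot → left ≤ c → c + k ≤ right →
    turtle (k + n) top bot left right r c 0 1
      = (List.range k).map (fun (j : Nat) => (r, c + (j : Int))) ++ turtle n top bot left right r (c + k) 0 1 := by
  induction k with
  | zero => intro n top bot left right r c _ _ _ _; simp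
  | succ k ih =>
    intro n top bot left right r c h1 h2 h3 h4
    have hk : (k:Int) + 1 ≤ right - c := by push_cast at h4; omega
    have hfuel : k + 1 + n = Nat.succ (k + n) := by omega
    rw [hfuel, turtle, if_pos ⟨by omega, by omega, by omega, by omega⟩]
    simp only [add_zero]
    rw [ih n top bot left right r (c+1) h1 h2 (by omega) (by omega)]
    rw [List.range_succ_eq_map, List.map_cons, List.map_map]
    simp only [Nat.cast_zero, add_zero, List.cons_append]
    have hc : c + 1 + (k:Int) = c + ((k+1 : Nat) : Int) := by push_cast; ring
    rw [hc]
    congr 1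
    congr 1
    apply List.map_congr_left; intro j hj; simp [Function.comp]; ring

lemma turtle_run_down (k : Nat) : ∀ (n : Nat) (top bot left right r c : Int),
    top ≤ r → r + k ≤ bot → left ≤ c → c ≤ right →
    turtle (k + n) top bot left right r c 1 0
      = (List.range k).map (fun (j : Nat) => (r + (j : Int), c)) ++ turtle n top bot left right (r + k) c 1 0 := by
  induction k with
  | zero => intro n top bot left right r c _ _ _ _; simp
  | succ k ih =>
    intro n top bot left right r c h1 h2 h3 h4
    have hk : (k:Int) + 1 ≤ bot - r := by push_cast at h2; omega
    have hfuel : k + 1 + n = Nat.succ (k + n) := by omega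
    rw [hfuel, turtle, if_pos ⟨by omega, by omega, by omega, by omega⟩]
    simp only [add_zero]
    rw [ih n top bot left right (r+1) c (by omega) (by omega) h3 h4]
    rw [List.range_succ_eq_map, List.map_cons, List.map_map]
    simp only [Nat.cast_zero, add_zero, List.cons_append]
    have hr : r + 1 + (k:Int) = r + ((k+1 : Nat) : Int) := by push_cast; ring
    rw [hr]
    congr 1
    congr 1
    apply List.map_congr_left; intro j hj; simp [Function.comp]; ring

lemma turtle_run_left (k : Nat) : ∀ (n : Nat) (top bot left right r c : Int),
    top ≤ r → r ≤ bot → left ≤ c - k → c ≤ right →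
    turtle (k + n) top bot left right r c 0 (-1)
      = (List.range k).map (fun (j : Nat) => (r, c - (j : Int))) ++ turtle n top bot left right r (c - k) 0 (-1) := by
  induction k with
  | zero => intro n top bot left right r c _ _ _ _; simp
  | succ k ih =>
    intro n top bot left right r c h1 h2 h3 h4
    have hk : (k:Int) + 1 ≤ c - left := by push_cast at h3; omega
    have hfuel : k + 1 + n = Nat.succ (k + n) := by omega
    rw [hfuel, turtle, if_pos ⟨by omega, by omega, by omega, by omega⟩]
    simp only [add_zero]
    rw [show c + -1 = c - 1 from by ring]
    rw [ih n top bot left right r (c-1) h1 h2 (by omega) (by omega)]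
    rw [List.range_succ_eq_map, List.map_cons, List.map_map]
    simp only [Nat.cast_zero, sub_zero, List.cons_append]
    have hc : c - 1 - (k:Int) = c - ((k+1 : Nat) : Int) := by push_cast; ring
    rw [hc]
    congr 1
    congr 1
    apply List.map_congr_left; intro j hj; simp [Function.comp]; ring

lemma turtle_run_up (k : Nat) : ∀ (n : Nat) (top bot left right r c : Int),
    top ≤ r - k → r ≤ bot → left ≤ c → c ≤ right →
    turtle (k + n) top bot left right r c (-1) 0
      = (List.range k).map (fun (j : Nat) => (r - (j : Int), c)) ++ turtle n top bot left right (r - k) c (-1) 0 := by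
  induction k with
  | zero => intro n top bot left right r c _ _ _ _; simp
  | succ k ih =>
    intro n top bot left right r c h1 h2 h3 h4
    have hk : (k:Int) + 1 ≤ r - top := by push_cast at h1; omega
    have hfuel : k + 1 + n = Nat.succ (k + n) := by omega
    rw [hfuel, turtle, if_pos ⟨by omega, by omega, by omega, by omega⟩]
    simp only [add_zero]
    rw [show r + -1 = r - 1 from by ring]
    rw [ih n top bot left right (r-1) c (by omega) (by omega) h3 h4]
    rw [List.range_succ_eq_map, List.map_cons, List.map_map]
    simp only [Nat.cast_zero, sub_zero, List.cons_append]
    have hr : r - 1 - (k:Int) = r - ((k+1 : Nat) : Int) := by push_cast; ring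
    rw [hr]
    congr 1
    congr 1
    apply List.map_congr_left; intro j hj; simp [Function.comp]; ring

-- the canonical cell sequence of the ring with top=left=T, bot=right=B (B = T + 2n+1)
def ringSeq (T B : Int) (n : Nat) : List (Int × Int) :=
  (List.range (2*n+1)).map (fun (j : Nat) => (T, T + (j : Int)))
  ++ [(T, B)]
  ++ (List.range (2*n)).map (fun (j : Nat) => (T + 1 + (j : Int), B))
  ++ [(B, B)]
  ++ (List.range (2*n)).map (fun (j : Nat) => (B, B - 1 - (j : Int)))
  ++ [(B, T)]
  ++ (List.range (2*n)).map (fun (j : Nat) => (B - 1 - (j : Int), T))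

-- the whole walk, for the box top=left=T, bot=right=B with B - T = 2n+1 (i.e. i = n+1 ≥ 1)
lemma turtle_walk (T B : Int) (n : Nat) (hTB : B = T + (2*n+1 : Nat)) :
    turtle (8*n+4) T B T B T T 0 1 = ringSeq T B n := by
  have hB : B = T + 2*(n:Int) + 1 := by push_cast at hTB; omega
  subst hB
  have e1 : 8*n+4 = (2*n+1) + (1 + (2*n + (1 + (2*n + (1 + 2*n))))) := by omega
  rw [e1]
  rw [turtle_run_right (2*n+1) _ _ _ _ _ _ _ (le_refl T) (by omega) (le_refl T) (by omega)]
  have c1 : T + ((2*n+1 : Nat) : Int) = T + 2*(n:Int) + 1 := by push_cast; ring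
  rw [c1]
  -- corner top-right
  rw [show (1 + (2*n + (1 + (2*n + (1 + 2*n))))) = Nat.succ (2*n + (1 + (2*n + (1 + 2*n)))) from by omega]
  rw [turtle, if_neg (by omega)]
  simp only [neg_zero, add_zero]
  -- run down
  rw [turtle_run_down (2*n) _ _ _ _ _ _ _ (by omega) (by omega) (by omega) (by omega)]
  have c2 : T + 1 + ((2*n : Nat) : Int) = T + 2*(n:Int) + 1 := by push_cast; ring
  rw [c2]
  -- corner bottom-right
  rw [show (1 + (2*n + (1 + 2*n))) = Nat.succ (2*n + (1 + 2*n)) from by omega]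
  rw [turtle, if_neg (by omega)]
  simp only [add_zero]
  rw [show T + 2*(n:Int) + 1 + -1 = T + 2*(n:Int) from by ring]
  -- run left
  rw [turtle_run_left (2*n) _ _ _ _ _ _ _ (by omega) (by omega) (by omega) (by omega)]
  have c3 : T + 2*(n:Int) - ((2*n : Nat) : Int) = T := by push_cast; ring
  rw [c3]
  -- corner bottom-left
  rw [show (1 + 2*n) = Nat.succ (2*n) from by omega]
  rw [turtle, if_neg (by omega)]
  simp only [add_zero, neg_zero]
  rw [show T + 2*(n:Int) + 1 + -1 = T + 2*(n:Int) from by ring]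
  -- run up
  have hup := turtle_run_up (2*n) 0 T (T + 2*(n:Int) + 1) T (T + 2*(n:Int) + 1)
      (T + 2*(n:Int)) T (by omega) (by omega) (by omega) (by omega)
  rw [Nat.add_zero] at hup
  rw [hup, show turtle 0 = fun _ _ _ _ _ _ _ _ => ([] : List (Int × Int)) from rfl]
  unfold ringSeq
  simp only [List.append_assoc, List.cons_append, List.nil_append, List.append_nil]
  ring_nf

-- A's concatenation of the four edges equals the same canonical sequence
lemma edges_eq_ringSeq (T B : Int) (n : Nat) (hTB : B = T + (2*n+1 : Nat)) :
    (PySem.List.pyRange T (B + 1) 1).map (fun c => ((T, c) : Int × Int))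
      ++ (PySem.List.pyRange (T + 1) B 1).map (fun r => ((r, B) : Int × Int))
      ++ (PySem.List.pyRange B (T - 1) (-1)).map (fun c => ((B, c) : Int × Int))
      ++ (PySem.List.pyRange (B - 1) T (-1)).map (fun r => ((r, T) : Int × Int))
    = ringSeq T B n := by
  have hB : B = T + 2*(n:Int) + 1 := by push_cast at hTB; omega
  subst hB
  rw [PySem.List.pyRange_one, PySem.List.pyRange_one,
      PySem.List.pyRange_neg_one, PySem.List.pyRange_neg_one]
  rw [show (T + 2*(n:Int) + 1 + 1 - T).toNat = (2*n+1)+1 from by omega,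
      show (T + 2*(n:Int) + 1 - (T + 1)).toNat = 2*n from by omega,
      show (T + 2*(n:Int) + 1 - (T - 1)).toNat = (2*n+1)+1 from by omega,
      show (T + 2*(n:Int) + 1 - 1 - T).toNat = 2*n from by omega]
  have e3 : (List.range (2*n+1+1)).map (fun k : Nat => (T + 2*(n:Int) + 1 - (k:Int)))
      = (T + 2*(n:Int) + 1) :: ((List.range (2*n)).map (fun k : Nat => T + 2*(n:Int) - (k:Int)) ++ [T]) := by
    rw [List.range_succ_eq_map, List.range_succ]
    simp only [List.map_cons, List.map_map, List.map_append,
      Nat.cast_zero, sub_zero]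
    congr 1
    congr 1
    · apply List.map_congr_left; intro j hj; simp only [Function.comp_def]; push_cast; ring
    · congr 1; push_cast; ring
  rw [e3, List.range_succ (n := 2*n+1)]
  unfold ringSeq
  simp only [List.map_append, List.map_map, List.map_cons,
    List.append_assoc, List.cons_append, List.nil_append, List.map_nil, Function.comp_def]
  push_cast
  ring_nf

theorem ring_coords_spec : Claim_equal_ring_coords := by
  intro H i _
  unfold Spec_ring_coords ring_coords ring_coords_alt
  dsimp only
  by_cases hi : i ≤ 0
  · rw [if_pos hi]
    rw [PySem.List.pyRange_one_eq_nil (by omega), PySem.List.pyRange_one_eq_nil (by omega),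
        PySem.List.pyRange_neg_one_eq_nil (by omega), PySem.List.pyRange_neg_one_eq_nil (by omega)]
    simp
  · rw [if_neg hi]
    push Not at hi
    obtain ⟨n, hn⟩ : ∃ n : Nat, i = (n:Int) + 1 := ⟨(i-1).toNat, by omega⟩
    subst hn
    rw [PySem.List.foldl_append_singleton_eq_map, PySem.List.foldl_append_singleton_eq_map,
        PySem.List.foldl_append_singleton_eq_map, PySem.List.foldl_append_singleton_eq_map]
    simp only [List.nil_append]
    rw [show (8*((n:Int)+1)-4).toNat = 8*n+4 from by omega]
    rw [turtle_walk (PySem.Int.floordiv H 2 - ((n:Int)+1)) (PySem.Int.floordiv H 2 + ((n:Int)+1) - 1) n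
          (by omega)]
    rw [edges_eq_ringSeq (PySem.Int.floordiv H 2 - ((n:Int)+1)) (PySem.Int.floordiv H 2 + ((n:Int)+1) - 1) n
          (by omega)]
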